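-- pv_equiv track=rewrite | github.com/enternityFan/LeetCodePythonVersion | 字符串/1807. 替换字符串中的括号内容.py | evaluate
-- ===== SOURCE A (Python) =====
-- import collections
-- from typing import List
--
-- def evaluate(s: str, knowledge: List[List[str]]) -> str:
--     mydict = collections.defaultdict(str)
--
--     for each in knowledge:
--         mydict[each[0]] = each[1]
--
--     #s = s.replace("({:})".format(each[0]),each[1])
--     lidx = s.find("(")
--     if lidx == -1:
--         #证明没有?的情况
--         return s
--     ridx = s.find(")")
--     while lidx !=-1 and ridx !=-1:
--         if s[lidx+1:ridx] in mydict: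
--             s = s.replace(s[lidx:ridx+1],mydict[s[lidx+1:ridx]])
--         else:
--             s = s.replace(s[lidx:ridx+1],"?")
--         lidx = s.find("(")
--         ridx = s.find(")")
--
--     return s
-- ===== SOURCE B (Python) =====
-- def evaluate(s, knowledge):
--     mapping = {}
--     for each in knowledge:
--         mapping[each[0]] = each[1]
--     out = []
--     i = 0
--     n = len(s)
--     while i < n:
--         if s[i] == '(':
--             j = s.find(')', i + 1)
--             if j == -1:
--                 out.append(s[i:])
--                 break
--             out.append(mapping.get(s[i + 1:j], '?'))
--             i = j + 1
--         else:
--             out.append(s[i])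
--             i += 1
--     return ''.join(out)
-- ===== Notes on version B (the rewrite author's own statement) =====
-- stated objective: alternative
-- what changed: A repeatedly rescans the whole string with find and rewrites it with a global str.replace once per token; B makes a single left-to-right scan, emitting literal characters and one dict lookup per (key) token into an output buffer.
-- outside the precondition, e.g. on evaluate('(a)', [['a', '(b)'], ['b', 'x']]): A returns 'x', B returns '(b)'; on evaluate('((a))', []): A returns '?)', B returns '?)'
import Mathlib
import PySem

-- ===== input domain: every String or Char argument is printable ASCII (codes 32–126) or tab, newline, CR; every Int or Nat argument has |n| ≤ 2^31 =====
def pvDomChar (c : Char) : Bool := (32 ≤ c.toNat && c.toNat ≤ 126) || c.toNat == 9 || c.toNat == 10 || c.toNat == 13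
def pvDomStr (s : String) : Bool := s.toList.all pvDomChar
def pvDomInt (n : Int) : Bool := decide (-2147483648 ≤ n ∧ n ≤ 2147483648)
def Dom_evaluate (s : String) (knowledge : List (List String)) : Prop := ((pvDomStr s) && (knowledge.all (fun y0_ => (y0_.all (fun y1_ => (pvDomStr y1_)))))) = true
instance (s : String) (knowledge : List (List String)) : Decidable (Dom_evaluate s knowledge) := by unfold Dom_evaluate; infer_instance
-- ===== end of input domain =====

-- B replaces A's find/global-replace loop (one whole-string rewrite per token) by a single
-- left-to-right scan with one dict lookup per token; return values agree on Pre_.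

-- ===== PORT A =====

-- the dict-building loop shared by both Pythons: mydict[each[0]] = each[1]
def pvDictOf (knowledge : List (List String)) : PySem.Dict String String :=
  knowledge.foldl
    (fun d each => d.insert ((PySem.List.pyGet? each 0).getD "") ((PySem.List.pyGet? each 1).getD ""))
    PySem.Dict.empty

-- A's while loop; fuel only makes the recursion total (A can loop forever outside Pre_),
-- it is large enough to never run out on inputs satisfying Pre_.
def pvLoopA (d : PySem.Dict String String) : Nat → List Char → List Char
  | 0, s => s
  | fuel + 1, s =>
    let lidx := PySem.Chars.find s ['(']
    let ridx := PySem.Chars.find s [')']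
    if lidx ≠ -1 ∧ ridx ≠ -1 then
      let key := String.ofList (PySem.Chars.slice s (some (lidx + 1)) (some ridx))
      let pat := PySem.Chars.slice s (some lidx) (some (ridx + 1))
      let s' :=
        if d.contains key then PySem.Chars.replace s pat (d.getD key "").toList
        else PySem.Chars.replace s pat ['?']
      pvLoopA d fuel s'
    else s

def evaluate (s : String) (knowledge : List (List String)) : String :=
  let d := pvDictOf knowledge
  let cs := s.toList
  if PySem.Chars.find cs ['('] = -1 then s
  else String.ofList (pvLoopA d (cs.length + 1) cs)

-- ===== PORT B =====

-- B's single scan: literal chars are copied, '(' looks for the next ')' (keeping the rest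
-- verbatim if there is none) and emits mapping.get(key, '?').
def pvScanB (d : PySem.Dict String String) : List Char → List Char
  | [] => []
  | c :: rest =>
    if c = '(' then
      let j := PySem.Chars.find rest [')']
      if j = -1 then c :: rest
      else
        (d.getD (String.ofList (PySem.List.slice rest (some 0) (some j))) "?").toList
          ++ pvScanB d (rest.drop (j.toNat + 1))
    else c :: pvScanB d rest
termination_by s => s.length
decreasing_by
  · simp only [List.length_drop, List.length_cons]; omega
  · simp only [List.length_cons]; omega

def evaluate_alt (s : String) (knowledge : List (List String)) : String :=
  String.ofList (pvScanB (pvDictOf knowledge) s.toList)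

-- ===== PRECONDITION & SPEC =====

-- well-formed parenthesisation: balanced, never nested (state = currently inside a token)
def pvWfAux : List Char → Bool → Bool
  | [], inside => !inside
  | c :: cs, false =>
    if c = '(' then pvWfAux cs true else if c = ')' then false else pvWfAux cs false
  | c :: cs, true =>
    if c = ')' then pvWfAux cs false else if c = '(' then false else pvWfAux cs true

-- Pre_ excludes: knowledge entries of length < 2 (A raises IndexError building the dict);
-- and, when s contains '(', malformed parenthesisations and knowledge values containing a
-- paren, on which A's repeated find/replace may loop forever or misparse re-inserted text.
def Pre_evaluate (s : String) (knowledge : List (List String)) : Prop :=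
  (knowledge.all fun each => 2 ≤ each.length) = true ∧
  ((!s.toList.contains '(') = true ∨
    (pvWfAux s.toList false = true ∧
      (knowledge.all fun each =>
        ((PySem.List.pyGet? each 1).getD "").toList.all fun c => c != '(' && c != ')') = true))

instance (s : String) (knowledge : List (List String)) : Decidable (Pre_evaluate s knowledge) := by
  unfold Pre_evaluate; infer_instance

def pvWitness_evaluate : String × List (List String) := ("(a) b", [["a", "x"]])

def Spec_evaluate (s : String) (knowledge : List (List String)) (out : String) : Prop := out = evaluate_alt s knowledge
instance (s : String) (knowledge : List (List String)) (out : String) : Decidable (Spec_evaluate s knowledge out) := by unfold Spec_evaluate; infer_instance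

-- ===== CLAIM (what is proved, stated in full; the proofs are below) =====
def Claim_equal_evaluate : Prop := ∀ (s : String) (knowledge : List (List String)), Dom_evaluate s knowledge → Pre_evaluate s knowledge → Spec_evaluate s knowledge (evaluate s knowledge)

-- ===== LEMMAS AND PROOFS =====

def pvOkC (c : Char) : Prop := c ≠ '(' ∧ c ≠ ')'

-- token structure of a well-formed string: a literal char or a '('key')' token
inductive PvTk where
  | lit (c : Char)
  | tok (k : List Char)
deriving DecidableEq, Repr

def pvFlat : List PvTk → List Char
  | [] => []
  | .lit c :: ts => c :: pvFlat ts
  | .tok k :: ts => '(' :: (k ++ ')' :: pvFlat ts)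

def pvGoodTk : PvTk → Prop
  | .lit c => pvOkC c
  | .tok k => ∀ c ∈ k, pvOkC c

def pvGood (ts : List PvTk) : Prop := ∀ t ∈ ts, pvGoodTk t

-- what both programs substitute for a token with key k
def pvF (d : PySem.Dict String String) (k : List Char) : List Char :=
  match d.get? (String.ofList k) with
  | some v => v.toList
  | none => ['?']

def pvRender (d : PySem.Dict String String) (ts : List PvTk) : List Char :=
  ts.flatMap (fun t => match t with | .lit c => [c] | .tok k => pvF d k)

def pvIsTok : PvTk → Bool
  | .tok _ => true
  | .lit _ => false

def pvNumToks (ts : List PvTk) : Nat := ts.countP pvIsTok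

-- substitution of every token with key k by the literal chunk repl
def pvSub (k : List Char) (repl : List Char) (ts : List PvTk) : List PvTk :=
  ts.flatMap (fun t => match t with
    | .tok k' => if k' = k then repl.map .lit else [t]
    | .lit c => [.lit c])

theorem pvFlat_append (a b : List PvTk) : pvFlat (a ++ b) = pvFlat a ++ pvFlat b := by
  induction a with
  | nil => rfl
  | cons t ts ih => cases t <;> simp [pvFlat, ih]

theorem pvFlat_map_lit (p : List Char) : pvFlat (p.map .lit) = p := by
  induction p with
  | nil => rfl
  | cons c p ih => simp [pvFlat, ih]

theorem pvSub_cons_lit (k repl : List Char) (c : Char) (ts : List PvTk) :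
    pvSub k repl (.lit c :: ts) = .lit c :: pvSub k repl ts := by
  simp [pvSub]

theorem pvSub_cons_tok_eq (k repl : List Char) (ts : List PvTk) :
    pvSub k repl (.tok k :: ts) = repl.map .lit ++ pvSub k repl ts := by
  simp [pvSub]

theorem pvSub_cons_tok_ne (k k' repl : List Char) (ts : List PvTk) (hk : k' ≠ k) :
    pvSub k repl (.tok k' :: ts) = .tok k' :: pvSub k repl ts := by
  simp [pvSub, hk]

theorem pvNumToks_cons (t : PvTk) (ts : List PvTk) :
    pvNumToks (t :: ts) = pvNumToks ts + (if pvIsTok t then 1 else 0) := by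
  simp [pvNumToks, List.countP_cons]

theorem pvNumToks_append (a b : List PvTk) :
    pvNumToks (a ++ b) = pvNumToks a + pvNumToks b := by
  simp [pvNumToks, List.countP_append]

theorem pvNumToks_map_lit (p : List Char) : pvNumToks (p.map .lit) = 0 := by
  simp [pvNumToks, List.countP_map, pvIsTok]

-- parsing a well-formed string into tokens
theorem pv_parse (s : List Char) :
    (pvWfAux s false = true → ∃ ts, pvGood ts ∧ pvFlat ts = s) ∧
    (pvWfAux s true = true →
      ∃ k ts, (∀ c ∈ k, pvOkC c) ∧ pvGood ts ∧ k ++ ')' :: pvFlat ts = s) := by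
  induction s with
  | nil =>
    refine ⟨fun _ => ⟨[], by simp [pvGood], rfl⟩, fun h => by simp [pvWfAux] at h⟩
  | cons c cs ih =>
    constructor
    · intro h
      simp only [pvWfAux] at h
      by_cases h1 : c = '('
      · simp only [h1] at h
        obtain ⟨k, ts, hk, hts, he⟩ := ih.2 (by simpa using h)
        refine ⟨.tok k :: ts, ?_, by simp [pvFlat, h1, he]⟩
        intro t ht
        rcases List.mem_cons.1 ht with rfl | ht
        · exact hk
        · exact hts t ht
      · by_cases h2 : c = ')'
        · simp [h2] at h
        · simp only [h1, h2, if_false] at h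
          obtain ⟨ts, hts, he⟩ := ih.1 (by simpa [h1, h2] using h)
          refine ⟨.lit c :: ts, ?_, by simp [pvFlat, he]⟩
          intro t ht
          rcases List.mem_cons.1 ht with rfl | ht
          · exact ⟨h1, h2⟩
          · exact hts t ht
    · intro h
      simp only [pvWfAux] at h
      by_cases h2 : c = ')'
      · simp only [h2] at h
        obtain ⟨ts, hts, he⟩ := ih.1 (by simpa using h)
        exact ⟨[], ts, by simp, hts, by simp [h2, he]⟩
      · by_cases h1 : c = '('
        · simp [h1] at h
        · obtain ⟨k, ts, hk, hts, he⟩ := ih.2 (by simpa [h1, h2] using h)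
          refine ⟨c :: k, ts, ?_, hts, by simp [he]⟩
          intro x hx
          rcases List.mem_cons.1 hx with rfl | hx
          · exact ⟨h1, h2⟩
          · exact hk x hx

-- find of a single char = position of its first occurrence
theorem pv_find_char (c : Char) (p t : List Char) (h : c ∉ p) :
    PySem.Chars.find (p ++ c :: t) [c] = (p.length : Int) := by
  have hinf : [c] <:+: p ++ c :: t := ⟨p, t, by simp⟩
  have h0 : 0 ≤ PySem.Chars.find (p ++ c :: t) [c] :=
    (PySem.Chars.find_nonneg_iff _ _).2 hinf
  obtain ⟨hpre, hmin⟩ := PySem.Chars.find_spec (s := p ++ c :: t) (sub := [c]) h0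
  set n := (PySem.Chars.find (p ++ c :: t) [c]).toNat with hn
  have hle : n ≤ p.length := by
    by_contra hgt
    exact hmin p.length (by omega) (by rw [List.drop_left]; exact ⟨t, rfl⟩)
  have hget : (p ++ c :: t)[n]? = some c := by
    obtain ⟨r, hr⟩ := hpre
    have h1 : ((p ++ c :: t).drop n)[0]? = some c := by rw [← hr]; rfl
    simpa [List.getElem?_drop] using h1
  have heq : n = p.length := by
    rcases Nat.lt_or_ge n p.length with hlt | hge
    · rw [List.getElem?_append_left hlt] at hget
      exact absurd (List.mem_of_getElem? hget) h
    · omega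
  rw [← Int.toNat_of_nonneg h0, ← hn, heq]

theorem pv_find_char_none (c : Char) (s : List Char) (h : c ∉ s) :
    PySem.Chars.find s [c] = -1 := by
  rw [PySem.Chars.find_eq_neg_one_iff]
  intro hinf
  exact h (hinf.subset (by simp))

-- shape of a good token list: all literals, or literals then a first token
theorem pv_shape (ts : List PvTk) (h : pvGood ts) :
    (∃ p : List Char, ts = p.map PvTk.lit ∧ ∀ c ∈ p, pvOkC c) ∨
    (∃ (p k : List Char) (rest : List PvTk), ts = p.map PvTk.lit ++ PvTk.tok k :: rest ∧ ∀ c ∈ p, pvOkC c) := by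
  induction ts with
  | nil => exact Or.inl ⟨[], rfl, by simp⟩
  | cons t ts ih =>
    have hgt : pvGoodTk t := h t (by simp)
    have hgts : pvGood ts := fun x hx => h x (by simp [hx])
    cases t with
    | tok k => exact Or.inr ⟨[], k, ts, rfl, by simp⟩
    | lit c =>
      rcases ih hgts with ⟨p, rfl, hp⟩ | ⟨p, k, rest, rfl, hp⟩
      · refine Or.inl ⟨c :: p, rfl, ?_⟩
        intro x hx
        rcases List.mem_cons.1 hx with rfl | hx
        · exact hgt
        · exact hp x hx
      · refine Or.inr ⟨c :: p, k, rest, rfl, ?_⟩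
        intro x hx
        rcases List.mem_cons.1 hx with rfl | hx
        · exact hgt
        · exact hp x hx

-- values stored in the dict come from the knowledge list
theorem pv_dict_values (knowledge : List (List String)) (k : String) (v : String)
    (h : (pvDictOf knowledge).get? k = some v) :
    ∃ each ∈ knowledge, v = (PySem.List.pyGet? each 1).getD "" := by
  have aux : ∀ (l : List (List String)) (acc : PySem.Dict String String),
      ((l.foldl (fun d each =>
          d.insert ((PySem.List.pyGet? each 0).getD "") ((PySem.List.pyGet? each 1).getD ""))
        acc).get? k = some v) →
      acc.get? k = some v ∨ ∃ each ∈ l, v = (PySem.List.pyGet? each 1).getD "" := by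
    intro l
    induction l with
    | nil => exact fun acc h => Or.inl h
    | cons e l ih =>
      intro acc h
      rcases ih _ h with hacc | ⟨each, hmem, hv⟩
      · rw [PySem.Dict.get?_insert] at hacc
        by_cases hk : k = (PySem.List.pyGet? e 0).getD ""
        · rw [if_pos hk] at hacc
          exact Or.inr ⟨e, by simp, by injection hacc with h'; exact h'.symm⟩
        · rw [if_neg hk] at hacc
          exact Or.inl hacc
      · exact Or.inr ⟨each, by simp [hmem], hv⟩
  unfold pvDictOf at h
  rcases aux knowledge PySem.Dict.empty h with hacc | hres
  · rw [PySem.Dict.get?_empty] at hacc; cases hacc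
  · exact hres

theorem pvRender_map_lit (d : PySem.Dict String String) (p : List Char) :
    pvRender d (p.map .lit) = p := by
  induction p with
  | nil => rfl
  | cons c p ih => simp [pvRender] at ih ⊢; exact ih

theorem pv_getD_eq_pvF (d : PySem.Dict String String) (k : List Char) :
    (d.getD (String.ofList k) "?").toList = pvF d k := by
  rw [PySem.Dict.getD_eq_get?_getD, pvF]
  cases hv : d.get? (String.ofList k) with
  | none => simp
  | some v => simp

-- B's scan renders each token independently
theorem pv_scanB (d : PySem.Dict String String) (ts : List PvTk) (h : pvGood ts) :
    pvScanB d (pvFlat ts) = pvRender d ts := by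
  induction ts with
  | nil => simp [pvScanB, pvFlat, pvRender]
  | cons t ts ih =>
    have hgt : pvGoodTk t := h t (by simp)
    have hgts : pvGood ts := fun x hx => h x (by simp [hx])
    cases t with
    | lit c =>
      have hc : c ≠ '(' := hgt.1
      rw [pvFlat, pvScanB, if_neg hc, ih hgts]
      simp [pvRender]
    | tok k =>
      have hk : ∀ c ∈ k, pvOkC c := hgt
      have hnr : ')' ∉ k := fun hm => (hk _ hm).2 rfl
      have hfind : PySem.Chars.find (k ++ ')' :: pvFlat ts) [')'] = (k.length : Int) :=
        pv_find_char _ _ _ hnr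
      have hne : ¬ ((k.length : Int) = -1) := by omega
      have hsplit : k ++ ')' :: pvFlat ts = (k ++ [')']) ++ pvFlat ts := by simp
      rw [pvFlat, pvScanB, if_pos rfl]
      simp only [hfind, if_neg hne, Int.toNat_natCast]
      rw [hsplit, show k.length + 1 = (k ++ [')']).length by simp, List.drop_left, ih hgts]
      rw [← hsplit]
      simp only [PySem.List.slice_zero_start, PySem.List.slice_to_natCast, List.take_left]
      rw [pv_getD_eq_pvF]
      simp [pvRender]

theorem pv_scanB_id (d : PySem.Dict String String) (s : List Char) (h : '(' ∉ s) :
    pvScanB d s = s := by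
  induction s with
  | nil => simp [pvScanB]
  | cons c rest ih =>
    have hc : c ≠ '(' := fun hc => h (hc ▸ List.mem_cons_self)
    rw [pvScanB, if_neg hc, ih (fun hx => h (List.mem_cons_of_mem _ hx))]

-- replace.go walks straight over a run of characters that cannot start the pattern
theorem pv_go_skip (p' new : List Char) :
    ∀ (m : List Char), (∀ x ∈ m, x ≠ '(') → ∀ rest acc fuel, m.length ≤ fuel →
      PySem.Chars.replace.go ('(' :: p') new fuel (m ++ rest) acc
        = PySem.Chars.replace.go ('(' :: p') new (fuel - m.length) rest (m.reverse ++ acc) := by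
  intro m
  induction m with
  | nil => intro _ rest acc fuel _; simp
  | cons x m ih =>
    intro hm rest acc fuel hf
    obtain ⟨f, rfl⟩ : ∃ f, fuel = f + 1 := ⟨fuel - 1, by simp at hf; omega⟩
    have hx : x ≠ '(' := hm x (by simp)
    have hpre : (('(' :: p').isPrefixOf (x :: (m ++ rest))) = false := by
      simp [List.isPrefixOf]
      intro h
      exact absurd h.symm hx
    rw [List.cons_append, PySem.Chars.replace.go, if_neg (by simp [hpre])]
    rw [ih (fun y hy => hm y (by simp [hy])) rest (x :: acc) f (by simp at hf; omega)]
    simp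

-- the pattern '('++k++')' matches at a token start iff the keys agree
theorem pv_prefix_tok (k k' f : List Char) (hk : ∀ c ∈ k, pvOkC c) (hk' : ∀ c ∈ k', pvOkC c) :
    ((k ++ [')']).isPrefixOf (k' ++ ')' :: f)) = true ↔ k = k' := by
  induction k generalizing k' with
  | nil =>
    cases k' with
    | nil => simp [List.isPrefixOf]
    | cons b k' =>
      have hb : b ≠ ')' := (hk' b (by simp)).2
      simp [List.isPrefixOf, Ne.symm hb]
  | cons a k ih =>
    cases k' with
    | nil =>
      have ha : a ≠ ')' := (hk a (by simp)).2
      simp [List.isPrefixOf, ha]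
    | cons b k' =>
      have ihk := ih k' (fun c hc => hk c (by simp [hc])) (fun c hc => hk' c (by simp [hc]))
      simp only [List.cons_append, List.isPrefixOf_cons₂] at ihk ⊢
      by_cases hab : a = b
      · subst hab; simp [ihk]
      · simp [hab]

theorem pv_go_main (k repl : List Char) (hk : ∀ c ∈ k, pvOkC c) :
    ∀ (ts : List PvTk) (acc : List Char) (fuel : Nat), pvGood ts → (pvFlat ts).length ≤ fuel →
      PySem.Chars.replace.go ('(' :: (k ++ [')'])) repl fuel (pvFlat ts) acc
        = acc.reverse ++ pvFlat (pvSub k repl ts) := by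
  intro ts
  induction ts with
  | nil =>
    intro acc fuel _ _
    cases fuel <;> simp [PySem.Chars.replace.go, pvFlat, pvSub]
  | cons t ts ih =>
    intro acc fuel hg hf
    have hgt : pvGoodTk t := hg t (by simp)
    have hgts : pvGood ts := fun x hx => hg x (by simp [hx])
    cases t with
    | lit c =>
      have hc : c ≠ '(' := hgt.1
      rw [pvFlat] at hf ⊢
      obtain ⟨f, rfl⟩ : ∃ f, fuel = f + 1 := ⟨fuel - 1, by simp at hf; omega⟩
      have hpre : (('(' :: (k ++ [')'])).isPrefixOf (c :: pvFlat ts)) = false := by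
        simp [List.isPrefixOf]
        intro h
        exact absurd h.symm hc
      rw [PySem.Chars.replace.go, if_neg (by simp [hpre])]
      rw [ih (c :: acc) f hgts (by simp at hf; omega), pvSub_cons_lit, pvFlat]
      simp
    | tok k' =>
      have hk' : ∀ c ∈ k', pvOkC c := hgt
      rw [pvFlat] at hf ⊢
      obtain ⟨f, rfl⟩ : ∃ f, fuel = f + 1 := ⟨fuel - 1, by simp at hf; omega⟩
      by_cases hkk : k' = k
      · subst hkk
        have hpre : (('(' :: (k' ++ [')'])).isPrefixOf ('(' :: (k' ++ ')' :: pvFlat ts))) = true := by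
          simp only [List.isPrefixOf_cons₂, beq_self_eq_true, Bool.true_and]
          exact (pv_prefix_tok k' k' (pvFlat ts) hk' hk').2 rfl
        rw [PySem.Chars.replace.go, if_pos hpre]
        have hdrop : ('(' :: (k' ++ ')' :: pvFlat ts)).drop ('(' :: (k' ++ [')'])).length
            = pvFlat ts := by
          have : '(' :: (k' ++ ')' :: pvFlat ts) = ('(' :: (k' ++ [')'])) ++ pvFlat ts := by simp
          rw [this, List.drop_left]
        rw [hdrop]
        rw [ih (repl.reverse ++ acc) f hgts (by simp at hf ⊢; omega), pvSub_cons_tok_eq]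
        rw [pvFlat_append, pvFlat_map_lit]
        simp
      · have hpre : (('(' :: (k ++ [')'])).isPrefixOf ('(' :: (k' ++ ')' :: pvFlat ts))) = false := by
          simp only [List.isPrefixOf_cons₂, beq_self_eq_true, Bool.true_and]
          rw [← Bool.not_eq_true]
          intro h
          exact hkk ((pv_prefix_tok k k' (pvFlat ts) hk hk').1 h).symm
        rw [PySem.Chars.replace.go, if_neg (by simp [hpre])]
        have hsk := pv_go_skip (k ++ [')']) repl (k' ++ [')'])
          (fun y hy => by
            rcases List.mem_append.1 hy with hy | hy
            · exact (hk' y hy).1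
            · simp at hy; subst hy; decide)
          (pvFlat ts) ('(' :: acc) f (by simp at hf ⊢; omega)
        rw [show k' ++ ')' :: pvFlat ts = (k' ++ [')']) ++ pvFlat ts by simp] at *
        rw [hsk]
        rw [ih _ _ hgts (by simp at hf ⊢; omega), pvSub_cons_tok_ne _ _ _ _ hkk, pvFlat]
        simp

-- str.replace of the token string substitutes exactly the tokens with that key
theorem pv_replace (ts : List PvTk) (k repl : List Char)
    (hts : pvGood ts) (hk : ∀ c ∈ k, pvOkC c) :
    PySem.Chars.replace (pvFlat ts) ('(' :: (k ++ [')'])) repl = pvFlat (pvSub k repl ts) := by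
  rw [PySem.Chars.replace]
  rw [if_neg (by simp)]
  have := pv_go_main k repl hk ts [] (pvFlat ts).length hts le_rfl
  simpa using this

theorem pv_render_sub (d : PySem.Dict String String) (ts : List PvTk) (k : List Char) :
    pvRender d (pvSub k (pvF d k) ts) = pvRender d ts := by
  induction ts with
  | nil => rfl
  | cons t ts ih =>
    cases t with
    | lit c => rw [pvSub_cons_lit]; simp only [pvRender, List.flatMap_cons] at ih ⊢; rw [ih]
    | tok k' =>
      by_cases hk : k' = k
      · subst hk
        rw [pvSub_cons_tok_eq]
        simp only [pvRender, List.flatMap_cons, List.flatMap_append] at ih ⊢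
        have hmap := pvRender_map_lit d (pvF d k')
        simp only [pvRender] at hmap
        rw [hmap, ih]
      · rw [pvSub_cons_tok_ne _ _ _ _ hk]
        simp only [pvRender, List.flatMap_cons] at ih ⊢
        rw [ih]

theorem pv_good_sub (ts : List PvTk) (k repl : List Char)
    (hts : pvGood ts) (hr : ∀ c ∈ repl, pvOkC c) : pvGood (pvSub k repl ts) := by
  induction ts with
  | nil => intro t ht; simp [pvSub] at ht
  | cons t ts ih =>
    have hgt : pvGoodTk t := hts t (by simp)
    have hgts : pvGood ts := fun x hx => hts x (by simp [hx])
    have ihg := ih hgts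
    cases t with
    | lit c =>
      rw [pvSub_cons_lit]
      intro x hx
      rcases List.mem_cons.1 hx with rfl | hx
      · exact hgt
      · exact ihg x hx
    | tok k' =>
      by_cases hk : k' = k
      · subst hk
        rw [pvSub_cons_tok_eq]
        intro x hx
        rcases List.mem_append.1 hx with hx | hx
        · obtain ⟨c, hc, rfl⟩ := List.mem_map.1 hx
          exact hr c hc
        · exact ihg x hx
      · rw [pvSub_cons_tok_ne _ _ _ _ hk]
        intro x hx
        rcases List.mem_cons.1 hx with rfl | hx
        · exact hgt
        · exact ihg x hx

theorem pv_numToks_sub_le (ts : List PvTk) (k repl : List Char) :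
    pvNumToks (pvSub k repl ts) ≤ pvNumToks ts := by
  induction ts with
  | nil => simp [pvNumToks, pvSub]
  | cons t ts ih =>
    cases t with
    | lit c => rw [pvSub_cons_lit, pvNumToks_cons, pvNumToks_cons]; omega
    | tok k' =>
      by_cases hk : k' = k
      · subst hk
        rw [pvSub_cons_tok_eq, pvNumToks_append, pvNumToks_map_lit, pvNumToks_cons]
        omega
      · rw [pvSub_cons_tok_ne _ _ _ _ hk, pvNumToks_cons, pvNumToks_cons]
        omega

theorem pv_numToks_sub_lt (ts : List PvTk) (k repl : List Char)
    (hmem : PvTk.tok k ∈ ts) : pvNumToks (pvSub k repl ts) < pvNumToks ts := by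
  induction ts with
  | nil => cases hmem
  | cons t ts ih =>
    rcases List.mem_cons.1 hmem with heq | hmem'
    · subst heq
      rw [pvSub_cons_tok_eq, pvNumToks_append, pvNumToks_map_lit, pvNumToks_cons]
      have := pv_numToks_sub_le ts k repl
      simp [pvIsTok]
      omega
    · have hlt := ih hmem'
      cases t with
      | lit c => rw [pvSub_cons_lit, pvNumToks_cons, pvNumToks_cons]; omega
      | tok k' =>
        by_cases hk : k' = k
        · subst hk
          rw [pvSub_cons_tok_eq, pvNumToks_append, pvNumToks_map_lit, pvNumToks_cons]
          omega
        · rw [pvSub_cons_tok_ne _ _ _ _ hk, pvNumToks_cons, pvNumToks_cons]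
          omega

theorem pv_numToks_le_len (ts : List PvTk) : pvNumToks ts ≤ (pvFlat ts).length := by
  induction ts with
  | nil => simp [pvNumToks]
  | cons t ts ih =>
    cases t with
    | lit c => rw [pvNumToks_cons, pvFlat]; simp [pvIsTok]; omega
    | tok k =>
      rw [pvNumToks_cons, pvFlat]
      simp [pvIsTok]
      omega

theorem pv_branch (d : PySem.Dict String String) (k : List Char) :
    (if d.contains (String.ofList k) then (d.getD (String.ofList k) "").toList else ['?'])
      = pvF d k := by
  rw [PySem.Dict.contains_eq_isSome_get?, PySem.Dict.getD_eq_get?_getD, pvF]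
  cases hv : d.get? (String.ofList k) <;> simp

-- A's loop renders every token, one loop iteration per remaining distinct key
theorem pv_loopA (d : PySem.Dict String String)
    (hd : ∀ k : List Char, ∀ c ∈ pvF d k, pvOkC c) :
    ∀ fuel ts, pvGood ts → pvNumToks ts ≤ fuel →
      pvLoopA d fuel (pvFlat ts) = pvRender d ts := by
  intro fuel
  induction fuel with
  | zero =>
    intro ts hg hn
    rcases pv_shape ts hg with ⟨p, rfl, hp⟩ | ⟨p, k, rest, rfl, hp⟩
    · rw [pvLoopA, pvFlat_map_lit, pvRender_map_lit]
    · exfalso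
      rw [pvNumToks_append, pvNumToks_cons] at hn
      simp [pvIsTok] at hn
  | succ fuel ih =>
    intro ts hg hn
    rcases pv_shape ts hg with ⟨p, rfl, hp⟩ | ⟨p, k, rest, rfl, hp⟩
    · have hfind : PySem.Chars.find (pvFlat (p.map .lit)) ['('] = -1 := by
        rw [pvFlat_map_lit]
        exact pv_find_char_none _ _ (fun hm => (hp _ hm).1 rfl)
      rw [pvLoopA]
      simp only [hfind, ne_eq, not_true_eq_false, false_and, if_false]
      rw [pvFlat_map_lit, pvRender_map_lit]
    · have hk : ∀ c ∈ k, pvOkC c := hg (.tok k) (by simp)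
      have hnp : '(' ∉ p := fun hm => (hp _ hm).1 rfl
      have hflat : pvFlat (p.map PvTk.lit ++ PvTk.tok k :: rest)
          = p ++ '(' :: (k ++ ')' :: pvFlat rest) := by
        rw [pvFlat_append, pvFlat_map_lit, pvFlat]
      have hfl : PySem.Chars.find (pvFlat (p.map PvTk.lit ++ PvTk.tok k :: rest)) ['(']
          = (p.length : Int) := by
        rw [hflat]; exact pv_find_char _ _ _ hnp
      have hfr : PySem.Chars.find (pvFlat (p.map PvTk.lit ++ PvTk.tok k :: rest)) [')']
          = ((p.length + k.length + 1 : Nat) : Int) := by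
        rw [hflat, show p ++ '(' :: (k ++ ')' :: pvFlat rest)
            = (p ++ '(' :: k) ++ ')' :: pvFlat rest by simp]
        have := pv_find_char ')' (p ++ '(' :: k) (pvFlat rest) (by
          intro hm
          rcases List.mem_append.1 hm with hm | hm
          · exact (hp _ hm).2 rfl
          · rcases List.mem_cons.1 hm with h' | hm
            · exact absurd h'.symm (by decide)
            · exact (hk _ hm).2 rfl)
        simpa using this
      have hkey : PySem.Chars.slice (pvFlat (p.map PvTk.lit ++ PvTk.tok k :: rest))
          (some ((p.length : Int) + 1)) (some ((p.length + k.length + 1 : Nat) : Int)) = k := by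
        rw [show ((p.length : Int) + 1) = ((p.length + 1 : Nat) : Int) by push_cast; ring]
        rw [PySem.Chars.slice_eq_listSlice, PySem.List.slice_natCast, hflat]
        rw [show p ++ '(' :: (k ++ ')' :: pvFlat rest)
            = (p ++ ['(']) ++ (k ++ ')' :: pvFlat rest) by simp]
        rw [show p.length + 1 = (p ++ ['(']).length by simp, List.drop_left]
        rw [show p.length + k.length + 1 - (p ++ ['(']).length = k.length by simp]
        rw [show k ++ ')' :: pvFlat rest = k ++ (')' :: pvFlat rest) by simp, List.take_left]
      have hpat : PySem.Chars.slice (pvFlat (p.map PvTk.lit ++ PvTk.tok k :: rest))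
          (some (p.length : Int)) (some (((p.length + k.length + 1 : Nat) : Int) + 1))
          = '(' :: (k ++ [')']) := by
        rw [show (((p.length + k.length + 1 : Nat) : Int) + 1)
            = ((p.length + k.length + 2 : Nat) : Int) by push_cast; ring]
        rw [PySem.Chars.slice_eq_listSlice, PySem.List.slice_natCast, hflat]
        rw [show p ++ '(' :: (k ++ ')' :: pvFlat rest)
            = p ++ ('(' :: (k ++ ')' :: pvFlat rest)) by simp, List.drop_left]
        rw [show p.length + k.length + 2 - p.length = k.length + 2 by omega]
        rw [show '(' :: (k ++ ')' :: pvFlat rest)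
            = ('(' :: (k ++ [')'])) ++ pvFlat rest by simp]
        rw [show k.length + 2 = ('(' :: (k ++ [')'])).length by simp, List.take_left]
      rw [pvLoopA]
      simp only [hfl, hfr, hkey, hpat, ne_eq]
      rw [if_pos ⟨by omega, by omega⟩]
      have hnum := pv_numToks_sub_lt (p.map PvTk.lit ++ PvTk.tok k :: rest) k (pvF d k)
        (by simp)
      by_cases hc : d.contains (String.ofList k)
      · have harg := pv_branch d k
        rw [if_pos hc] at harg
        rw [if_pos hc, harg, pv_replace _ _ _ hg hk,
          ih _ (pv_good_sub _ _ _ hg (hd k)) (by omega), pv_render_sub]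
      · have harg := pv_branch d k
        rw [if_neg hc] at harg
        rw [if_neg hc, harg, pv_replace _ _ _ hg hk,
          ih _ (pv_good_sub _ _ _ hg (hd k)) (by omega), pv_render_sub]

-- ===== VERDICT (by name: the statement is the Claim_ definition above) =====
theorem evaluate_spec : Claim_equal_evaluate := by
  unfold Claim_equal_evaluate
  intro s knowledge _ hpre
  unfold Spec_evaluate evaluate evaluate_alt
  obtain ⟨hlen, hcase⟩ := hpre
  rcases hcase with hnp' | ⟨hwf, hvals'⟩
  · have hnp : '(' ∉ s.toList := by simpa using hnp'
    rw [if_pos (pv_find_char_none _ _ hnp), pv_scanB_id _ _ hnp, String.ofList_toList]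
  · have hvals : ∀ each ∈ knowledge,
        ∀ c ∈ ((PySem.List.pyGet? each 1).getD "").toList, pvOkC c := by
      intro each he c hc
      have h1 := List.all_eq_true.1 (List.all_eq_true.1 hvals' each he) c hc
      simp only [Bool.and_eq_true, bne_iff_ne, ne_eq] at h1
      exact h1
    obtain ⟨ts, hg, hflat⟩ := (pv_parse s.toList).1 hwf
    have hd : ∀ k : List Char, ∀ c ∈ pvF (pvDictOf knowledge) k, pvOkC c := by
      intro k c hc
      rw [pvF] at hc
      cases hv : (pvDictOf knowledge).get? (String.ofList k) with
      | none => rw [hv] at hc; simp at hc; subst hc; constructor <;> decide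
      | some v =>
        rw [hv] at hc
        obtain ⟨each, hmem, rfl⟩ := pv_dict_values knowledge _ _ hv
        exact hvals each hmem c hc
    rw [← hflat]
    by_cases hfind : PySem.Chars.find (pvFlat ts) ['('] = -1
    · rw [if_pos hfind, pv_scanB _ ts hg]
      rcases pv_shape ts hg with ⟨p, rfl, hp⟩ | ⟨p, k, rest, rfl, hp⟩
      · rw [pvRender_map_lit, ← pvFlat_map_lit p, hflat, String.ofList_toList]
      · exfalso
        have hfc := pv_find_char '(' p (k ++ ')' :: pvFlat rest) (fun hm => (hp _ hm).1 rfl)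
        rw [pvFlat_append, pvFlat_map_lit, pvFlat, hfc] at hfind
        omega
    · rw [if_neg hfind, pv_scanB _ ts hg,
        pv_loopA _ hd _ ts hg (by have := pv_numToks_le_len ts; omega)]
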